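-- pv_equiv track=rewrite | github.com/zhrli324/DiffuGuard | LLaDA/visualization/visualization_paper.py | track_token_positions
-- ===== SOURCE A (Python) =====
-- from typing import List, Dict
--
-- def track_token_positions(history: Dict[int, List[str]]) -> List[int]:
--     """Track the first generation step for each token"""
--     num_positions = 64
--     steps_to_unmask = [-1] * num_positions
--
--     for step in sorted(history.keys()):
--         tokens = history[step]
--         for idx in range(num_positions):
--             if idx >= len(tokens):
--                 continue
--
--             token = tokens[idx]
--             if steps_to_unmask[idx] == -1 and token != '<|mdm_mask|>':
--                 steps_to_unmask[idx] = step
--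
--     return steps_to_unmask
-- ===== SOURCE B (Python) =====
-- def track_token_positions(history):
--     """Track the first generation step for each token"""
--     num_positions = 64
--     items = [(step, history[step]) for step in sorted(history.keys())]
--     result = []
--     for idx in range(num_positions):
--         first = -1
--         for step, tokens in items:
--             if idx < len(tokens) and tokens[idx] != '<|mdm_mask|>':
--                 first = step
--                 break
--         result.append(first)
--     return result
-- ===== Notes on version B (the rewrite author's own statement) =====
-- stated objective: alternative
-- what changed: Inverted the loop nesting: instead of sweeping all 64 positions for every step while guarding already-filled slots, B computes each position independently by a short-circuiting scan over the sorted steps that stops at the first unmasked token.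
import Mathlib
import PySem

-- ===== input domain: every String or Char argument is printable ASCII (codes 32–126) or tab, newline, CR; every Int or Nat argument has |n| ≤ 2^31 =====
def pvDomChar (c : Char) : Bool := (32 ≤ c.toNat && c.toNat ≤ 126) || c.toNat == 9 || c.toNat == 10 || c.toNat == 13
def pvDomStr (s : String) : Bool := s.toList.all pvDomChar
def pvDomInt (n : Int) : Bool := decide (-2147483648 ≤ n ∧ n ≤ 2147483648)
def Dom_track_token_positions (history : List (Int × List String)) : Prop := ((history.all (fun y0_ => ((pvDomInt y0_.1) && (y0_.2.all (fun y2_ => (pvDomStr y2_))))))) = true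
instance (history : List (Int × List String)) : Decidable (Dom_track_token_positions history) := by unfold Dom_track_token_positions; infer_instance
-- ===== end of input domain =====

-- B inverts the loop nesting: each of the 64 positions is computed independently by a
-- short-circuiting scan over the sorted step keys (objective: alternative decomposition).

def pvMask : String := "<|mdm_mask|>"

-- dict lookup history[step] (first match; steps come from the key list, so it is total here)
def pvTokens (history : List (Int × List String)) (s : Int) : List String :=
  ((history.find? (fun p => p.1 == s)).map Prod.snd).getD []

-- ===== PORT A =====
def track_token_positions (history : List (Int × List String)) : List Int :=
  (PySem.List.sorted (history.map Prod.fst) (fun x => x) false).foldl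
    (fun st step =>
      (List.range 64).foldl
        (fun st idx =>
          if (pvTokens history step).length ≤ idx then st
          else if st.getD idx 0 = -1 ∧ (pvTokens history step).getD idx "" ≠ pvMask then
            st.set idx step
          else st)
        st)
    (List.replicate 64 (-1))

-- ===== PORT B =====
def pvFirstStep : List (Int × List String) → Nat → Int
  | [], _ => -1
  | (s, tokens) :: rest, idx =>
    if idx < tokens.length ∧ tokens.getD idx "" ≠ pvMask then s
    else pvFirstStep rest idx

def track_token_positions_alt (history : List (Int × List String)) : List Int :=
  (List.range 64).map
    (fun idx =>
      pvFirstStep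
        ((PySem.List.sorted (history.map Prod.fst) (fun x => x) false).map
          (fun step => (step, pvTokens history step)))
        idx)

-- ===== PRECONDITION & SPEC =====
-- Pre_ excludes histories containing the step key -1: that key coincides with the -1
-- 'never unmasked' sentinel of the output, so the recorded -1 is indistinguishable from
-- 'still masked' and A lets a later step overwrite it; no behaviour is specified there.
def Pre_track_token_positions (history : List (Int × List String)) : Prop :=
  ∀ p ∈ history, p.1 ≠ (-1 : Int)
instance (history : List (Int × List String)) : Decidable (Pre_track_token_positions history) := by
  unfold Pre_track_token_positions; infer_instance

def pvWitness_track_token_positions : (List (Int × List String)) :=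
  [(0, ["a", "<|mdm_mask|>"]), (1, ["a", "b"])]

def Spec_track_token_positions (history : List (Int × List String)) (out : List Int) : Prop := out = track_token_positions_alt history
instance (history : List (Int × List String)) (out : List Int) : Decidable (Spec_track_token_positions history out) := by unfold Spec_track_token_positions; infer_instance

-- ===== CLAIM (what is proved, stated in full; the proofs are below) =====
def Claim_equal_track_token_positions : Prop := ∀ (history : List (Int × List String)), Dom_track_token_positions history → Pre_track_token_positions history → Spec_track_token_positions history (track_token_positions history)

-- ===== LEMMAS AND PROOFS =====

-- the inner sweep of A preserves the length of the state list
theorem pv_inner_length (history : List (Int × List String)) (step : Int) :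
    ∀ (L : List Nat) (st : List Int),
      (L.foldl
        (fun st idx =>
          if (pvTokens history step).length ≤ idx then st
          else if st.getD idx 0 = -1 ∧ (pvTokens history step).getD idx "" ≠ pvMask then
            st.set idx step
          else st)
        st).length = st.length := by
  intro L
  induction L with
  | nil => intro st; rfl
  | cons a L ih =>
    intro st
    simp only [List.foldl_cons]
    rw [ih]
    split_ifs <;> simp

-- one pass of A's inner sweep, seen at a single slot j
theorem pv_step_getD (history : List (Int × List String)) (step : Int)
    (st : List Int) (j : Nat) :
    (if (pvTokens history step).length ≤ j then st
     else if st.getD j 0 = -1 ∧ (pvTokens history step).getD j "" ≠ pvMask then st.set j step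
     else st).getD j 0 =
    if st.getD j 0 = -1 ∧ j < (pvTokens history step).length ∧
        (pvTokens history step).getD j "" ≠ pvMask then step
    else st.getD j 0 := by
  by_cases hlen : (pvTokens history step).length ≤ j
  · rw [if_pos hlen, if_neg (fun h => absurd h.2.1 (by omega))]
  · rw [if_neg hlen]
    by_cases hcond : st.getD j 0 = -1 ∧ (pvTokens history step).getD j "" ≠ pvMask
    · rw [if_pos hcond, if_pos ⟨hcond.1, by omega, hcond.2⟩]
      have hjlen : j < st.length := by
        by_contra hge
        have : st.getD j 0 = 0 := by
          simp [List.getD_eq_getElem?_getD, List.getElem?_eq_none (by omega : st.length ≤ j)]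
        omega
      simp [List.getD_eq_getElem?_getD, hjlen]
    · rw [if_neg hcond, if_neg (fun h => hcond ⟨h.1, h.2.2⟩)]

-- what the inner sweep does to one slot
theorem pv_inner_getD (history : List (Int × List String)) (step : Int) :
    ∀ (L : List Nat) (st : List Int) (j : Nat), L.Nodup →
      (L.foldl
        (fun st idx =>
          if (pvTokens history step).length ≤ idx then st
          else if st.getD idx 0 = -1 ∧ (pvTokens history step).getD idx "" ≠ pvMask then
            st.set idx step
          else st)
        st).getD j 0 =
      if j ∈ L ∧ st.getD j 0 = -1 ∧ j < (pvTokens history step).length ∧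
          (pvTokens history step).getD j "" ≠ pvMask then step
      else st.getD j 0 := by
  intro L
  induction L with
  | nil => intro st j _; simp
  | cons a L ih =>
    intro st j hnd
    have hndL : L.Nodup := (List.nodup_cons.mp hnd).2
    have haL : a ∉ L := (List.nodup_cons.mp hnd).1
    simp only [List.foldl_cons]
    rw [ih _ j hndL]
    by_cases hja : j = a
    · subst hja
      have hjL : j ∉ L := haL
      simp only [hjL, false_and]
      rw [pv_step_getD]
      simp [List.mem_cons]
    · have hkeep :
          (if (pvTokens history step).length ≤ a then st
           else if st.getD a 0 = -1 ∧ (pvTokens history step).getD a "" ≠ pvMask then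
             st.set a step
           else st).getD j 0 = st.getD j 0 := by
        split_ifs with h1 h2
        · rfl
        · simp [List.getD_eq_getElem?_getD, List.getElem?_set_ne (by omega : a ≠ j)]
        · rfl
      rw [hkeep]
      simp only [List.mem_cons, hja, false_or]

-- A's fold over the sorted keys computes B's per-position scan
theorem pv_outer_getD (history : List (Int × List String)) (j : Nat) (hj : j < 64) :
    ∀ (keys : List Int) (st : List Int), (∀ s ∈ keys, s ≠ (-1 : Int)) →
      (keys.foldl
        (fun st step =>
          (List.range 64).foldl
            (fun st idx =>
              if (pvTokens history step).length ≤ idx then st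
              else if st.getD idx 0 = -1 ∧ (pvTokens history step).getD idx "" ≠ pvMask then
                st.set idx step
              else st)
            st)
        st).getD j 0 =
      if st.getD j 0 = -1 then
        pvFirstStep (keys.map (fun step => (step, pvTokens history step))) j
      else st.getD j 0 := by
  intro keys
  induction keys with
  | nil => intro st _; simp [pvFirstStep]
  | cons s rest ih =>
    intro st hne
    have hs : s ≠ (-1 : Int) := hne s (by simp)
    have hrest : ∀ t ∈ rest, t ≠ (-1 : Int) := fun t ht => hne t (by simp [ht])
    simp only [List.foldl_cons]
    rw [ih _ hrest]
    rw [pv_inner_getD history s (List.range 64) st j (List.nodup_range)]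
    simp only [List.mem_range, hj, true_and]
    simp only [List.map_cons, pvFirstStep]
    by_cases h0 : st.getD j 0 = -1
    · by_cases hc : j < (pvTokens history s).length ∧ (pvTokens history s).getD j "" ≠ pvMask
      · have e1 : (if st.getD j 0 = -1 ∧ j < (pvTokens history s).length ∧
            (pvTokens history s).getD j "" ≠ pvMask then s else st.getD j 0) = s :=
          if_pos ⟨h0, hc⟩
        rw [e1, if_neg hs, if_pos h0, if_pos hc]
      · have e1 : (if st.getD j 0 = -1 ∧ j < (pvTokens history s).length ∧
            (pvTokens history s).getD j "" ≠ pvMask then s else st.getD j 0) = st.getD j 0 :=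
          if_neg (fun h => hc h.2)
        rw [e1, if_pos h0, if_pos h0, if_neg hc]
    · have e1 : (if st.getD j 0 = -1 ∧ j < (pvTokens history s).length ∧
          (pvTokens history s).getD j "" ≠ pvMask then s else st.getD j 0) = st.getD j 0 :=
        if_neg (fun h => h0 h.1)
      rw [e1, if_neg h0, if_neg h0]

-- A's outer fold preserves the state length
theorem pv_outer_length (history : List (Int × List String)) :
    ∀ (keys : List Int) (st : List Int),
      (keys.foldl
        (fun st step =>
          (List.range 64).foldl
            (fun st idx =>
              if (pvTokens history step).length ≤ idx then st
              else if st.getD idx 0 = -1 ∧ (pvTokens history step).getD idx "" ≠ pvMask then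
                st.set idx step
              else st)
            st)
        st).length = st.length := by
  intro keys
  induction keys with
  | nil => intro st; rfl
  | cons s rest ih =>
    intro st
    simp only [List.foldl_cons]
    rw [ih, pv_inner_length]

-- ===== VERDICT (by name: the statement is the Claim_ definition above) =====
theorem track_token_positions_spec : Claim_equal_track_token_positions := by
  intro history _hdom hpre
  unfold Spec_track_token_positions track_token_positions track_token_positions_alt
  have hkeys : ∀ s ∈ PySem.List.sorted (history.map Prod.fst) (fun x => x) false,
      s ≠ (-1 : Int) := by
    intro s hs
    have hmem : s ∈ history.map Prod.fst := (PySem.List.mem_sorted _ _ _ _).mp hs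
    obtain ⟨p, hp, hps⟩ := List.mem_map.mp hmem
    exact hps ▸ hpre p hp
  have hlen :
      ((PySem.List.sorted (history.map Prod.fst) (fun x => x) false).foldl
        (fun st step =>
          (List.range 64).foldl
            (fun st idx =>
              if (pvTokens history step).length ≤ idx then st
              else if st.getD idx 0 = -1 ∧ (pvTokens history step).getD idx "" ≠ pvMask then
                st.set idx step
              else st)
            st)
        (List.replicate 64 (-1))).length = 64 := by
    rw [pv_outer_length]; simp
  apply List.ext_getElem
  · rw [hlen]; simp
  · intro j h1 h2
    have hj : j < 64 := by rw [hlen] at h1; exact h1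
    rw [← List.getD_eq_getElem _ 0 h1]
    rw [pv_outer_getD history j hj _ _ hkeys]
    have hrep : (List.replicate 64 (-1 : Int)).getD j 0 = -1 := by
      simp only [List.getD_eq_getElem?_getD, List.getElem?_replicate, hj, if_true,
        Option.getD_some]
    rw [hrep, if_pos rfl]
    simp [List.getElem_map, List.getElem_range]
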